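-- pv_equiv track=rewrite | github.com/Nikomah/Domimo-pygame | robot_logic.py | calc_max_entries
-- ===== SOURCE A (Python) =====
-- def calc_number_of_entries(ready_to_move: list, robot_list: list) -> dict:
--     """
--     Calculates occurrences for each digit of the movable digits.
--     :param ready_to_move: list, Nominations of bones suitable for running
--     :param robot_list: list, Nominations of all robot's bones
--     :return: dict, The key is a digit, the value is the number of occurrences
--     """
--     entries = {}
--     move_digits = [x[0] for x in ready_to_move] + [x[1] for x in ready_to_move]
--     robot_digits = [x[0] for x in robot_list] + [x[1] for x in robot_list]
--     for dig in move_digits: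
--         entries[dig] = robot_digits.count(dig)
--     return entries
--
-- def calc_max_entries(ready_to_move: list, robot_list: list) -> set:
--     """
--     Determines digits with the largest number of occurrences.
--     :param ready_to_move: list, Nominations of bones suitable for running
--     :param robot_list: list, Nominations of all robot's bones
--     :return: set, digits with the largest number of occurrences, once or more
--     """
--     max_digits = []
--     entries = calc_number_of_entries(ready_to_move, robot_list)
--     max_entry = max(set(entries.values()))
--     for key, value in entries.items():
--         if value == max_entry:
--             max_digits.append(key)
--     return set(max_digits)
-- ===== SOURCE B (Python) =====
-- def calc_max_entries(ready_to_move: list, robot_list: list) -> set: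
--     move_digits = [x[0] for x in ready_to_move] + [x[1] for x in ready_to_move]
--     robot_digits = [x[0] for x in robot_list] + [x[1] for x in robot_list]
--     counts = {}
--     for d in robot_digits:
--         counts[d] = counts.get(d, 0) + 1
--     best = None
--     winners = []
--     seen = set()
--     for d in move_digits:
--         if d in seen:
--             continue
--         seen.add(d)
--         c = counts.get(d, 0)
--         if best is None or c > best:
--             best = c
--             winners = [d]
--         elif c == best:
--             winners.append(d)
--     return set(winners)
-- ===== Notes on version B (the rewrite author's own statement) =====
-- stated objective: faster
-- what changed: Replaces A's build-a-count-dict (with a quadratic robot_digits.count per movable digit), take max over its values, then rescan the dict, by a counts dict built in one pass over robot_digits followed by a single running-max scan over the movable digits (skipping already-seen ones) that maintains the current best count and its winners list.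
-- outside the precondition, e.g. on calc_max_entries([], [(1, 2)]): A raises ValueError, B returns set()
-- crash fix: On empty ready_to_move A raises ValueError (max() of an empty sequence); B returns the empty set. — e.g. on calc_max_entries([], [(1, 2)]): A raises ValueError, B returns []
import Mathlib
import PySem

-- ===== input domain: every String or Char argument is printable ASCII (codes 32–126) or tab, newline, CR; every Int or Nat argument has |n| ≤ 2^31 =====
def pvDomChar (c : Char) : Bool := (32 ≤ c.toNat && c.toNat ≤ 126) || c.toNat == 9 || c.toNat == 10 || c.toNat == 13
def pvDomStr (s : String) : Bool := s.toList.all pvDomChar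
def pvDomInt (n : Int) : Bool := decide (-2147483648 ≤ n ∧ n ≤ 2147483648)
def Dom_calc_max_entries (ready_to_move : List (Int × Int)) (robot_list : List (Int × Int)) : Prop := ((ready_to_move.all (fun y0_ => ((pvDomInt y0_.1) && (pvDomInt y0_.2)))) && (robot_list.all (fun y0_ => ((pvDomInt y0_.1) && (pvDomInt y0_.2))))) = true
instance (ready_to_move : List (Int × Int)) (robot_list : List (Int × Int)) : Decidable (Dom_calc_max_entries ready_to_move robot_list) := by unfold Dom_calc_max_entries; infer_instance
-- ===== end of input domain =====

-- B replaces A's per-digit robot_digits.count scan + dict rescan by a one-pass counts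
-- dict and a single running-max scan over the movable digits (objective: faster).

-- ===== PORT A =====
def calc_number_of_entries (ready_to_move : List (Int × Int)) (robot_list : List (Int × Int)) : PySem.Dict Int Int :=
  let move_digits := ready_to_move.map (fun x => x.1) ++ ready_to_move.map (fun x => x.2)
  let robot_digits := robot_list.map (fun x => x.1) ++ robot_list.map (fun x => x.2)
  move_digits.foldl (fun entries dig => entries.insert dig ((PySem.List.count robot_digits dig : Nat) : Int)) PySem.Dict.empty

def calc_max_entries (ready_to_move : List (Int × Int)) (robot_list : List (Int × Int)) : List Int :=
  let entries := calc_number_of_entries ready_to_move robot_list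
  match PySem.List.max? (PySem.Set.ofList entries.values) (fun v => v) with
  | none => []  -- Python raises ValueError here (max of an empty sequence); excluded by Pre_calc_max_entries
  | some max_entry =>
      PySem.Set.ofList (entries.items.foldl
        (fun max_digits kv => if kv.2 == max_entry then max_digits ++ [kv.1] else max_digits) [])

-- ===== PORT B =====
def calc_max_entries_alt (ready_to_move : List (Int × Int)) (robot_list : List (Int × Int)) : List Int :=
  let move_digits := ready_to_move.map (fun x => x.1) ++ ready_to_move.map (fun x => x.2)
  let robot_digits := robot_list.map (fun x => x.1) ++ robot_list.map (fun x => x.2)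
  let counts := robot_digits.foldl (fun c d => c.insert d (c.getD d 0 + 1)) PySem.Dict.empty
  let st := move_digits.foldl
    (fun (st : Option Int × List Int × PySem.Set Int) d =>
      if PySem.Set.contains st.2.2 d then st
      else
        let seen := PySem.Set.add st.2.2 d
        let c := counts.getD d 0
        match st.1 with
        | none => (some c, [d], seen)
        | some best =>
            if best < c then (some c, [d], seen)
            else if c == best then (some best, st.2.1 ++ [d], seen)
            else (some best, st.2.1, seen))
    (none, [], PySem.Set.empty)
  PySem.Set.ofList st.2.1

-- ===== PRECONDITION & SPEC =====
-- Pre_ excludes only empty ready_to_move, on which A's max() raises ValueError.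
def Pre_calc_max_entries (ready_to_move : List (Int × Int)) (robot_list : List (Int × Int)) : Prop :=
  ready_to_move ≠ []
instance (ready_to_move : List (Int × Int)) (robot_list : List (Int × Int)) : Decidable (Pre_calc_max_entries ready_to_move robot_list) := by unfold Pre_calc_max_entries; infer_instance

def pvWitness_calc_max_entries : (List (Int × Int)) × (List (Int × Int)) := ([(1, 2)], [(1, 2), (2, 3)])

-- On empty ready_to_move A raises ValueError (max() of an empty sequence); B returns the empty set.
def Raises_calc_max_entries (ready_to_move : List (Int × Int)) (robot_list : List (Int × Int)) : Prop :=
  ready_to_move = []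
instance (ready_to_move : List (Int × Int)) (robot_list : List (Int × Int)) : Decidable (Raises_calc_max_entries ready_to_move robot_list) := by unfold Raises_calc_max_entries; infer_instance
def pvRaiseWitness_calc_max_entries : (List (Int × Int)) × (List (Int × Int)) := ([], [(1, 2)])
def pvRaiseWitnessOut_calc_max_entries : List Int := []

def Spec_calc_max_entries (ready_to_move : List (Int × Int)) (robot_list : List (Int × Int)) (out : List Int) : Prop := out = calc_max_entries_alt ready_to_move robot_list
instance (ready_to_move : List (Int × Int)) (robot_list : List (Int × Int)) (out : List Int) : Decidable (Spec_calc_max_entries ready_to_move robot_list out) := by unfold Spec_calc_max_entries; infer_instance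

-- ===== CLAIM (what is proved, stated in full; the proofs are below) =====
def Claim_equal_calc_max_entries : Prop := ∀ (ready_to_move : List (Int × Int)) (robot_list : List (Int × Int)), Dom_calc_max_entries ready_to_move robot_list → Pre_calc_max_entries ready_to_move robot_list → Spec_calc_max_entries ready_to_move robot_list (calc_max_entries ready_to_move robot_list)
def Claim_raises_calc_max_entries : Prop := (∀ (ready_to_move : List (Int × Int)) (robot_list : List (Int × Int)), Dom_calc_max_entries ready_to_move robot_list → Raises_calc_max_entries ready_to_move robot_list → ¬ Pre_calc_max_entries ready_to_move robot_list) ∧ (Dom_calc_max_entries (pvRaiseWitness_calc_max_entries.1) (pvRaiseWitness_calc_max_entries.2) ∧ Raises_calc_max_entries (pvRaiseWitness_calc_max_entries.1) (pvRaiseWitness_calc_max_entries.2) ∧ calc_max_entries_alt (pvRaiseWitness_calc_max_entries.1) (pvRaiseWitness_calc_max_entries.2) = pvRaiseWitnessOut_calc_max_entries)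

-- ===== LEMMAS AND PROOFS =====

-- proof-side names for the shared pieces of the two ports
def pvMove (l : List (Int × Int)) : List Int := l.map (fun x => x.1) ++ l.map (fun x => x.2)

def pvF (robot : List Int) (k : Int) : Int := ((PySem.List.count robot k : Nat) : Int)

def pvEntries (f : Int → Int) (move : List Int) : PySem.Dict Int Int :=
  move.foldl (fun entries dig => entries.insert dig (f dig)) PySem.Dict.empty

def pvCounts (robot_list : List (Int × Int)) : PySem.Dict Int Int :=
  (pvMove robot_list).foldl (fun c d => c.insert d (c.getD d 0 + 1)) PySem.Dict.empty

-- B's loop body (g d = the count B looks up for digit d)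
def pvBlam (g : Int → Int) (st : Option Int × List Int × PySem.Set Int) (d : Int) :
    Option Int × List Int × PySem.Set Int :=
  if PySem.Set.contains st.2.2 d then st
  else
    match st.1 with
    | none => (some (g d), [d], PySem.Set.add st.2.2 d)
    | some best =>
        if best < g d then (some (g d), [d], PySem.Set.add st.2.2 d)
        else if g d == best then (some best, st.2.1 ++ [d], PySem.Set.add st.2.2 d)
        else (some best, st.2.1, PySem.Set.add st.2.2 d)

-- B's loop body, seen-set stripped (the reference scan step)
def pvStep (g : Int → Int) (st : Option Int × List Int) (d : Int) : Option Int × List Int :=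
  match st.1 with
  | none => (some (g d), [d])
  | some best =>
      if best < g d then (some (g d), [d])
      else if g d == best then (some best, st.2 ++ [d])
      else (some best, st.2)

-- the digits of `move` not in `s`, first occurrences, in order
def pvFresh (s : PySem.Set Int) : List Int → List Int
  | [] => []
  | x :: r => if PySem.Set.contains s x then pvFresh s r else x :: pvFresh (s ++ [x]) r

lemma pvA_eq (rtm rl : List (Int × Int)) : calc_max_entries rtm rl =
    (match PySem.List.max? (PySem.Set.ofList (pvEntries (pvF (pvMove rl)) (pvMove rtm)).values) (fun v => v) with
     | none => ([] : List Int)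
     | some max_entry =>
         PySem.Set.ofList ((pvEntries (pvF (pvMove rl)) (pvMove rtm)).items.foldl
           (fun max_digits kv => if kv.2 == max_entry then max_digits ++ [kv.1] else max_digits) [])) := rfl

lemma pvB_eq (rtm rl : List (Int × Int)) : calc_max_entries_alt rtm rl =
    PySem.Set.ofList (((pvMove rtm).foldl (pvBlam (fun d => (pvCounts rl).getD d 0))
      (none, [], PySem.Set.empty)).2.1) := rfl

lemma pvCounts_getD (rl : List (Int × Int)) (d : Int) :
    (pvCounts rl).getD d 0 = pvF (pvMove rl) d := by
  unfold pvCounts pvF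
  rw [PySem.Dict.getD_foldl_insert_add_one]
  simp [PySem.Dict.getD_empty, PySem.List.count_eq]

lemma pvUpdate_eq (move : List Int) : ∀ s : PySem.Set Int,
    PySem.Set.update s move = s ++ pvFresh s move := by
  induction move with
  | nil => intro s; simp [PySem.Set.update, pvFresh]
  | cons x r ih =>
      intro s
      rw [PySem.Set.update_cons]
      cases hx : PySem.Set.contains s x with
      | true =>
          have hmem : x ∈ s := by simpa [PySem.Set.contains] using hx
          have hfr : pvFresh s (x :: r) = pvFresh s r := by simp [pvFresh, hmem]
          rw [PySem.Set.add_of_mem hmem, ih s, hfr]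
      | false =>
          have hmem : x ∉ s := by simpa [PySem.Set.contains] using hx
          have hfr : pvFresh s (x :: r) = x :: pvFresh (s ++ [x]) r := by simp [pvFresh, hmem]
          rw [PySem.Set.add_of_not_mem hmem, ih (s ++ [x]), hfr]
          simp

lemma pvOfList_eq_fresh (move : List Int) :
    PySem.Set.ofList move = pvFresh PySem.Set.empty move := by
  have h := pvUpdate_eq move PySem.Set.empty
  simpa [PySem.Set.update, PySem.Set.ofList, PySem.Set.empty] using h

lemma pvBlam_skip (g : Int → Int) (b : Option Int) (w : List Int) (s : PySem.Set Int) (d : Int)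
    (hmem : d ∈ s) : pvBlam g (b, w, s) d = (b, w, s) := by
  simp [pvBlam, hmem]

lemma pvBlam_new (g : Int → Int) (b : Option Int) (w : List Int) (s : PySem.Set Int) (d : Int)
    (hmem : d ∉ s) :
    pvBlam g (b, w, s) d = ((pvStep g (b, w) d).1, (pvStep g (b, w) d).2, PySem.Set.add s d) := by
  cases b with
  | none => simp [pvBlam, pvStep, hmem]
  | some best =>
      simp [pvBlam, pvStep, hmem]
      split_ifs <;> simp

lemma pvB_fold (g : Int → Int) (move : List Int) : ∀ (s : PySem.Set Int) (b : Option Int) (w : List Int),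
    move.foldl (pvBlam g) (b, w, s)
    = (((pvFresh s move).foldl (pvStep g) (b, w)).1,
       ((pvFresh s move).foldl (pvStep g) (b, w)).2,
       PySem.Set.update s move) := by
  induction move with
  | nil =>
      intro s b w
      simp [pvFresh, PySem.Set.update]
  | cons x r ih =>
      intro s b w
      rw [List.foldl_cons, PySem.Set.update_cons]
      cases hx : PySem.Set.contains s x with
      | true =>
          have hmem : x ∈ s := by simpa [PySem.Set.contains] using hx
          have hfr : pvFresh s (x :: r) = pvFresh s r := by simp [pvFresh, hmem]
          rw [pvBlam_skip g b w s x hmem, PySem.Set.add_of_mem hmem, hfr]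
          exact ih s b w
      | false =>
          have hmem : x ∉ s := by simpa [PySem.Set.contains] using hx
          have hfr : pvFresh s (x :: r) = x :: pvFresh (s ++ [x]) r := by simp [pvFresh, hmem]
          rw [pvBlam_new g b w s x hmem, PySem.Set.add_of_not_mem hmem, hfr, List.foldl_cons]
          exact ih (s ++ [x]) (pvStep g (b, w) x).1 (pvStep g (b, w) x).2

lemma pvScan (f : Int → Int) (u : List Int) (hne : u ≠ []) :
    ∃ m, u.foldl (pvStep f) (none, []) = (some m, u.filter (fun k => f k == m))
      ∧ (∃ k ∈ u, f k = m) ∧ (∀ k ∈ u, f k ≤ m) := by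
  induction u using List.reverseRecOn with
  | nil => cases hne rfl
  | append_singleton u' d ih =>
      rcases eq_or_ne u' [] with h' | h'
      · subst h'
        refine ⟨f d, ?_, ⟨d, by simp, rfl⟩, by simp⟩
        simp [pvStep]
      · obtain ⟨m', hscan, ⟨k₀, hk₀, hfk₀⟩, hmax⟩ := ih h'
        rw [List.foldl_append, hscan]
        by_cases h1 : m' < f d
        · refine ⟨f d, ?_, ⟨d, by simp, rfl⟩, ?_⟩
          · have hfilter : u'.filter (fun k => f k == f d) = [] := by
              rw [List.filter_eq_nil_iff]
              intro k hk
              have := hmax k hk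
              simp only [beq_iff_eq]
              omega
            simp [pvStep, if_pos h1, List.filter_append, hfilter]
          · intro k hk
            rcases List.mem_append.mp hk with hk | hk
            · have := hmax k hk; omega
            · simp at hk; subst hk; omega
        · by_cases h2 : f d = m'
          · refine ⟨m', ?_, ⟨k₀, by simp [hk₀], hfk₀⟩, ?_⟩
            · simp [pvStep, h2, List.filter_append]
            · intro k hk
              rcases List.mem_append.mp hk with hk | hk
              · exact hmax k hk
              · simp at hk; subst hk; omega
          · refine ⟨m', ?_, ⟨k₀, by simp [hk₀], hfk₀⟩, ?_⟩
            · have hfd : (f d == m') = false := by simpa using h2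
              simp [pvStep, if_neg h1, hfd, List.filter_append]
            · intro k hk
              rcases List.mem_append.mp hk with hk | hk
              · exact hmax k hk
              · simp at hk; subst hk; omega

lemma pvMax?_eq (l : List Int) (m : Int) (hm : m ∈ l) (hmax : ∀ y ∈ l, y ≤ m) :
    PySem.List.max? l (fun v => v) = some m := by
  cases h : PySem.List.max? l (fun v => v) with
  | none =>
      rw [PySem.List.max?_eq_none_iff] at h
      subst h; cases hm
  | some m' =>
      have h1 : m ≤ m' := PySem.List.max?_isMax h m hm
      have h2 : m' ≤ m := hmax m' (PySem.List.max?_mem h)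
      exact congrArg some (le_antisymm h2 h1)

lemma pvGet?_fold_insert (f : Int → Int) (move : List Int) :
    ∀ (d : PySem.Dict Int Int) (k : Int),
      (move.foldl (fun e dig => e.insert dig (f dig)) d).get? k
        = if k ∈ move then some (f k) else d.get? k := by
  induction move with
  | nil => intro d k; simp
  | cons x r ih =>
      intro d k
      rw [List.foldl_cons, ih]
      by_cases hr : k ∈ r
      · simp [hr, List.mem_cons]
      · rcases eq_or_ne k x with rfl | hkx
        · simp [hr, PySem.Dict.get?_insert_self]
        · simp [hr, hkx, PySem.Dict.get?_insert_of_ne _ _ hkx]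

lemma pvItems (f : Int → Int) (move : List Int) :
    (pvEntries f move).items = (PySem.Set.ofList move).map (fun k => (k, f k)) := by
  have hnd : (pvEntries f move).keys.Nodup := by
    unfold pvEntries
    exact PySem.Dict.nodup_keys_foldl_insert move (fun _ dig => f dig) PySem.Dict.empty (by simp)
  have hkeys : (pvEntries f move).keys = PySem.Set.ofList move := by
    unfold pvEntries
    rw [PySem.Dict.keys_foldl_insert]
    simp [PySem.Dict.keys_empty, PySem.Set.update, PySem.Set.ofList]
  rw [PySem.Dict.items_eq_map_keys _ hnd 0, hkeys]
  refine List.map_congr_left ?_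
  intro k hk
  have hkm : k ∈ move := (PySem.Set.mem_ofList move k).mp hk
  have hget := pvGet?_fold_insert f move PySem.Dict.empty k
  rw [if_pos hkm] at hget
  have : (pvEntries f move).getD k 0 = f k := by
    rw [PySem.Dict.getD_eq_get?_getD]
    unfold pvEntries
    rw [hget]
    rfl
  rw [this]

lemma pvMain (f : Int → Int) (move : List Int) (hmne : move ≠ []) :
    (match PySem.List.max? (PySem.Set.ofList (pvEntries f move).values) (fun v => v) with
     | none => ([] : List Int)
     | some max_entry =>
         PySem.Set.ofList ((pvEntries f move).items.foldl
           (fun max_digits kv => if kv.2 == max_entry then max_digits ++ [kv.1] else max_digits) []))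
    = PySem.Set.ofList ((move.foldl (pvBlam f) (none, [], PySem.Set.empty)).2.1) := by
  have hitems := pvItems f move
  have hvalues : (pvEntries f move).values = (PySem.Set.ofList move).map f := by
    show (pvEntries f move).items.map (fun p => p.2) = _
    rw [hitems, List.map_map]
    rfl
  have hune : PySem.Set.ofList move ≠ [] := by
    intro hc
    rcases move with _ | ⟨a, t⟩
    · exact hmne rfl
    · have ha : a ∈ PySem.Set.ofList (a :: t) := (PySem.Set.mem_ofList _ _).mpr (by simp)
      rw [hc] at ha; cases ha
  obtain ⟨m, hscan, ⟨k₀, hk₀, hfk₀⟩, hmax⟩ := pvScan f (PySem.Set.ofList move) hune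
  have hmaxeq : PySem.List.max? (PySem.Set.ofList (pvEntries f move).values) (fun v => v)
      = some m := by
    apply pvMax?_eq
    · rw [hvalues, PySem.Set.mem_ofList]
      exact List.mem_map.mpr ⟨k₀, hk₀, hfk₀⟩
    · intro y hy
      rw [hvalues, PySem.Set.mem_ofList] at hy
      obtain ⟨k, hk, rfl⟩ := List.mem_map.mp hy
      exact hmax k hk
  simp only [hmaxeq]
  -- A side
  rw [hitems, PySem.List.foldl_append_if, List.filter_map, List.map_map, List.nil_append]
  have hcomp1 : ((fun (kv : Int × Int) => kv.2 == m) ∘ fun k => (k, f k)) = fun k => f k == m := rfl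
  have hcomp2 : ((fun (kv : Int × Int) => kv.1) ∘ fun k => (k, f k)) = id := rfl
  rw [hcomp1, hcomp2, List.map_id]
  -- B side
  rw [pvB_fold f move PySem.Set.empty none []]
  rw [← pvOfList_eq_fresh, hscan]

theorem pvMove_ne (l : List (Int × Int)) (h : l ≠ []) : pvMove l ≠ [] := by
  unfold pvMove
  intro hc
  rcases List.append_eq_nil_iff.mp hc with ⟨h1, _⟩
  exact h (List.map_eq_nil_iff.mp h1)

-- ===== VERDICT (by name: the statement is the Claim_ definition above) =====
theorem calc_max_entries_spec : Claim_equal_calc_max_entries := by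
  intro rtm rl _ hpre
  unfold Spec_calc_max_entries
  unfold Pre_calc_max_entries at hpre
  rw [pvA_eq, pvB_eq,
    show (fun d => (pvCounts rl).getD d 0) = pvF (pvMove rl) from funext (pvCounts_getD rl)]
  exact pvMain (pvF (pvMove rl)) (pvMove rtm) (pvMove_ne rtm hpre)

theorem calc_max_entries_raises : Claim_raises_calc_max_entries := by
  unfold Claim_raises_calc_max_entries
  refine ⟨?_, by decide⟩
  intro rtm rl _ hr
  unfold Raises_calc_max_entries at hr
  unfold Pre_calc_max_entries
  simp [hr]

-- self-check: the raise-witness lies inside Raises_ and B's port returns the stated value there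
theorem calc_max_entries_raises_witness_ok :
    Raises_calc_max_entries pvRaiseWitness_calc_max_entries.1 pvRaiseWitness_calc_max_entries.2 ∧
    calc_max_entries_alt pvRaiseWitness_calc_max_entries.1 pvRaiseWitness_calc_max_entries.2
      = pvRaiseWitnessOut_calc_max_entries := by
  have h := calc_max_entries_raises
  unfold Claim_raises_calc_max_entries at h
  exact ⟨h.2.2.1, h.2.2.2⟩
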